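-- pv_equiv track=rewrite | github.com/cmbi/gold_standard | src/calc_alignment_quality.py | calc_sums
-- ===== SOURCE A (Python) =====
-- def calc_sums(aln, id1, id2):
--     sum_pos = 0
--     sum_neg = 0
--     for i in range(len(aln[id1])):
--         if ((aln[id1][i] == "-" and aln[id2][i] != "-") or
--                 (aln[id1][i] != "-" and aln[id2][i] == "-")):
--             sum_neg += 1
--         elif aln[id1][i] != "-" and aln[id2][i] != "-":
--             sum_pos += 2
--     return {"pos": sum_pos, "neg": sum_neg}
-- ===== SOURCE B (Python) =====
-- def calc_sums(aln, id1, id2):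
--     a = aln[id1]
--     b = aln[id2]
--     n = len(a)
--     g1 = sum(1 for i in range(n) if a[i] == "-")
--     g2 = sum(1 for i in range(n) if b[i] == "-")
--     both = sum(1 for i in range(n) if a[i] == "-" and b[i] == "-")
--     return {"pos": 2 * (n - g1 - g2 + both), "neg": g1 + g2 - 2 * both}
-- ===== Notes on version B (the rewrite author's own statement) =====
-- stated objective: alternative
-- what changed: Replaces the per-column three-way branch accumulation with three branch-free gap counts (gaps in id1, gaps in id2, columns gapped in both) combined by inclusion-exclusion arithmetic.
import Mathlib
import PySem

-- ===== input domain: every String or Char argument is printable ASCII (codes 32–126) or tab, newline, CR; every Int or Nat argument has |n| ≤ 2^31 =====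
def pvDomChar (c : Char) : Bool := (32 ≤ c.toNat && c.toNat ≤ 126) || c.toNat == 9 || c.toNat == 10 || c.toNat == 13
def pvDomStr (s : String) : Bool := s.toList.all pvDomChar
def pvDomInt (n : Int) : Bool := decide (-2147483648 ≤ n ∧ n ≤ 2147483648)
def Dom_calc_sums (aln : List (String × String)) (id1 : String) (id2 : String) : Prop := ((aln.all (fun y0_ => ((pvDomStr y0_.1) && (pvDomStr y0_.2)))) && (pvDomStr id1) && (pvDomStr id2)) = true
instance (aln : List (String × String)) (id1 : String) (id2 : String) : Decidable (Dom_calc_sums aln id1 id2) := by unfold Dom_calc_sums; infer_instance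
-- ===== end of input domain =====

-- B replaces A's per-column three-way branching with three branch-free gap counts combined by inclusion-exclusion arithmetic (alternative decomposition, same cost).


-- dict lookup (first match), shared by both ports and the precondition
def pvLookup (aln : List (String × String)) (k : String) : Option String :=
  (aln.find? (fun p => p.1 == k)).map (·.2)

-- ===== PORT A =====
-- the body of A's for-loop, literally: the three-way branch on the two column characters
def pvStepA (s1 s2 : String) (st : Int × Int) (i : Int) : Int × Int :=
  match PySem.Str.pyGet? s1 i, PySem.Str.pyGet? s2 i with
  | some c1, some c2 =>
      if (c1 = '-' ∧ c2 ≠ '-') ∨ (c1 ≠ '-' ∧ c2 = '-') then (st.1, st.2 + 1)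
      else if c1 ≠ '-' ∧ c2 ≠ '-' then (st.1 + 2, st.2)
      else st
  | _, _ => st   -- Python raises IndexError here; Pre_ excludes it

def calc_sums (aln : List (String × String)) (id1 : String) (id2 : String) : List (String × Int) :=
  match pvLookup aln id1, pvLookup aln id2 with
  | some s1, some s2 =>
      let r := (PySem.List.pyRange 0 (PySem.Str.len s1) 1).foldl (pvStepA s1 s2) (0, 0)
      [("pos", r.1), ("neg", r.2)]
  | _, _ => []     -- Python raises KeyError here; Pre_ excludes it

-- ===== PORT B =====
-- sum(1 for i in L if s[i] == "-")
def pvGapCnt (s : String) (L : List Int) : Int :=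
  L.foldl (fun acc i => if PySem.Str.pyGet? s i = some '-' then acc + 1 else acc) 0
-- sum(1 for i in L if s1[i] == "-" and s2[i] == "-")
def pvBothCnt (s1 s2 : String) (L : List Int) : Int :=
  L.foldl (fun acc i =>
    if PySem.Str.pyGet? s1 i = some '-' ∧ PySem.Str.pyGet? s2 i = some '-' then acc + 1 else acc) 0

def calc_sums_alt (aln : List (String × String)) (id1 : String) (id2 : String) : List (String × Int) :=
  match pvLookup aln id1, pvLookup aln id2 with
  | some a, some b =>
      let n := PySem.Str.len a
      let L := PySem.List.pyRange 0 n 1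
      let g1 := pvGapCnt a L
      let g2 := pvGapCnt b L
      let both := pvBothCnt a b L
      [("pos", 2 * (n - g1 - g2 + both)), ("neg", g1 + g2 - 2 * both)]
  | _, _ => []     -- Python raises KeyError here; Pre_ excludes it

-- ===== PRECONDITION & SPEC =====
-- Pre_ excludes exactly the inputs where Python A raises: a missing id (KeyError) or
-- aln[id2] shorter than aln[id1] (IndexError when indexing aln[id2][i]).
def Pre_calc_sums (aln : List (String × String)) (id1 : String) (id2 : String) : Prop :=
  (pvLookup aln id1).isSome ∧ (pvLookup aln id2).isSome ∧
  ((pvLookup aln id1).getD "").toList.length ≤ ((pvLookup aln id2).getD "").toList.length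
instance (aln : List (String × String)) (id1 : String) (id2 : String) : Decidable (Pre_calc_sums aln id1 id2) := by unfold Pre_calc_sums; infer_instance

def pvWitness_calc_sums : (List (String × String)) × String × String :=
  ([("x", "A-B"), ("y", "AB-")], "x", "y")

def Spec_calc_sums (aln : List (String × String)) (id1 : String) (id2 : String) (out : List (String × Int)) : Prop := out = calc_sums_alt aln id1 id2
instance (aln : List (String × String)) (id1 : String) (id2 : String) (out : List (String × Int)) : Decidable (Spec_calc_sums aln id1 id2 out) := by unfold Spec_calc_sums; infer_instance

-- ===== CLAIM (what is proved, stated in full; the proofs are below) =====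
def Claim_equal_calc_sums : Prop := ∀ (aln : List (String × String)) (id1 : String) (id2 : String), Dom_calc_sums aln id1 id2 → Pre_calc_sums aln id1 id2 → Spec_calc_sums aln id1 id2 (calc_sums aln id1 id2)

-- ===== LEMMAS AND PROOFS =====

-- core loop equivalence: A's single branching fold equals B's inclusion-exclusion combination
lemma pv_main (s1 s2 : String) (hab : s1.toList.length ≤ s2.toList.length)
    (n : Nat) (hn : n ≤ s1.toList.length) :
    (PySem.List.pyRange 0 (n : Int) 1).foldl (pvStepA s1 s2) (0, 0) =
      (2 * ((n : Int) - pvGapCnt s1 (PySem.List.pyRange 0 (n : Int) 1)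
            - pvGapCnt s2 (PySem.List.pyRange 0 (n : Int) 1)
            + pvBothCnt s1 s2 (PySem.List.pyRange 0 (n : Int) 1)),
       pvGapCnt s1 (PySem.List.pyRange 0 (n : Int) 1)
         + pvGapCnt s2 (PySem.List.pyRange 0 (n : Int) 1)
         - 2 * pvBothCnt s1 s2 (PySem.List.pyRange 0 (n : Int) 1)) := by
  induction n with
  | zero => simp [pvGapCnt, pvBothCnt]
  | succ m ih =>
    have h1 : m < s1.toList.length := by omega
    have h2 : m < s2.toList.length := by omega
    have hr : PySem.List.pyRange 0 ((m + 1 : Nat) : Int) 1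
        = PySem.List.pyRange 0 (m : Int) 1 ++ [(m : Int)] := by
      push_cast
      exact PySem.List.pyRange_one_succ_right (by omega)
    have hg1 : PySem.Str.pyGet? s1 (m : Int) = some s1.toList[m] := by
      simp [List.getElem?_eq_getElem h1]
    have hg2 : PySem.Str.pyGet? s2 (m : Int) = some s2.toList[m] := by
      simp [List.getElem?_eq_getElem h2]
    rw [hr]
    simp only [pvGapCnt, pvBothCnt, List.foldl_append, List.foldl_cons, List.foldl_nil]
    rw [show ((PySem.List.pyRange 0 (m : Int) 1).foldl (pvStepA s1 s2) (0, 0)) = _ from ih (by omega)]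
    simp only [pvStepA, pvGapCnt, pvBothCnt] at *
    rw [hg1, hg2]
    by_cases hc1 : s1.toList[m] = '-' <;> by_cases hc2 : s2.toList[m] = '-' <;>
      simp [hc1, hc2, Prod.ext_iff] <;> omega

-- ===== VERDICT (by name: the statement is the Claim_ definition above) =====
theorem calc_sums_spec : Claim_equal_calc_sums := by
  intro aln id1 id2 _ hpre
  obtain ⟨h1, h2, hlen⟩ := hpre
  obtain ⟨s1, hs1⟩ := Option.isSome_iff_exists.mp h1
  obtain ⟨s2, hs2⟩ := Option.isSome_iff_exists.mp h2
  rw [hs1, hs2] at hlen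
  simp only [Option.getD_some] at hlen
  unfold Spec_calc_sums calc_sums calc_sums_alt
  rw [hs1, hs2]
  dsimp only
  rw [show PySem.Str.len s1 = ((s1.toList.length : Nat) : Int) by simp,
      pv_main s1 s2 hlen s1.toList.length le_rfl]
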